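-- pv_equiv track=rewrite | github.com/orange472/SushiGoSolver | heuristic_agent.py | get_cnts
-- ===== SOURCE A (Python) =====
-- from typing import List
--
-- def get_cnts(sushi_go_list: List[int]):
--     nigiri_cnt = 0
--     wasabi_cnt = 0
--     tempura_cnt = 0
--     maki_cnt = 0
--     dumpling_cnt = 0
--     sashimi_cnt = 0
--     for card in sushi_go_list:
--         if card == 0:
--             tempura_cnt += 1
--         elif card == 1:
--             sashimi_cnt += 1
--         elif card == 2:
--             dumpling_cnt += 1
--         elif card == 3 or card == 4 or card == 5:
--             maki_cnt += card - 2
--         elif card == 6 or card == 7 or card == 8: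
--             nigiri_cnt += 1
--         elif card == 9:
--             wasabi_cnt += 1
--     return nigiri_cnt, wasabi_cnt, tempura_cnt, maki_cnt, dumpling_cnt, sashimi_cnt
-- ===== SOURCE B (Python) =====
-- def get_cnts(sushi_go_list):
--     c = sushi_go_list.count
--     return (c(6) + c(7) + c(8),
--             c(9),
--             c(0),
--             c(3) + 2 * c(4) + 3 * c(5),
--             c(2),
--             c(1))
-- ===== Notes on version B (the rewrite author's own statement) =====
-- stated objective: idiomatic
-- what changed: Replaces the per-card if/elif tallying loop with per-type list.count queries combined arithmetically (maki weighted 1/2/3), no running accumulators.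
import Mathlib
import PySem

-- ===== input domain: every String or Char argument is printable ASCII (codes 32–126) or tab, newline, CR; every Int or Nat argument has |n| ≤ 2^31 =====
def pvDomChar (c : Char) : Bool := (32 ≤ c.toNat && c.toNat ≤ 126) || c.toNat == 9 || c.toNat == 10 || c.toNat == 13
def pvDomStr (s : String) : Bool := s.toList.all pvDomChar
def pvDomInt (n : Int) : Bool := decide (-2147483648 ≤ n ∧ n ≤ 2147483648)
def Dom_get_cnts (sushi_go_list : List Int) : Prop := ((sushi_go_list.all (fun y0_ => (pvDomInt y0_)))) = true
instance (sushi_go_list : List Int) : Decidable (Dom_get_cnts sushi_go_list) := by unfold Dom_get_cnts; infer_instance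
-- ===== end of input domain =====

-- B replaces A's per-card if/elif accumulator loop with per-type list.count queries combined arithmetically (idiomatic; same cost).

-- ===== PORT A =====
-- literal transliteration of A: fold over the six accumulators with the if/elif chain
def get_cnts (sushi_go_list : List Int) : Int × Int × Int × Int × Int × Int :=
  let st := sushi_go_list.foldl
    (fun (acc : Int × Int × Int × Int × Int × Int) card =>
      let (nigiri_cnt, wasabi_cnt, tempura_cnt, maki_cnt, dumpling_cnt, sashimi_cnt) := acc
      if card = 0 then (nigiri_cnt, wasabi_cnt, tempura_cnt + 1, maki_cnt, dumpling_cnt, sashimi_cnt)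
      else if card = 1 then (nigiri_cnt, wasabi_cnt, tempura_cnt, maki_cnt, dumpling_cnt, sashimi_cnt + 1)
      else if card = 2 then (nigiri_cnt, wasabi_cnt, tempura_cnt, maki_cnt, dumpling_cnt + 1, sashimi_cnt)
      else if card = 3 ∨ card = 4 ∨ card = 5 then (nigiri_cnt, wasabi_cnt, tempura_cnt, maki_cnt + (card - 2), dumpling_cnt, sashimi_cnt)
      else if card = 6 ∨ card = 7 ∨ card = 8 then (nigiri_cnt + 1, wasabi_cnt, tempura_cnt, maki_cnt, dumpling_cnt, sashimi_cnt)
      else if card = 9 then (nigiri_cnt, wasabi_cnt + 1, tempura_cnt, maki_cnt, dumpling_cnt, sashimi_cnt)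
      else acc)
    (0, 0, 0, 0, 0, 0)
  st

-- ===== PORT B =====
-- B: per-type counts via list.count, combined arithmetically
def get_cnts_alt (sushi_go_list : List Int) : Int × Int × Int × Int × Int × Int :=
  let c := fun (v : Int) => (PySem.List.count sushi_go_list v : Int)
  (c 6 + c 7 + c 8, c 9, c 0, c 3 + 2 * c 4 + 3 * c 5, c 2, c 1)

-- ===== PRECONDITION & SPEC =====
def Spec_get_cnts (sushi_go_list : List Int) (out : Int × Int × Int × Int × Int × Int) : Prop := out = get_cnts_alt sushi_go_list
instance (sushi_go_list : List Int) (out : Int × Int × Int × Int × Int × Int) : Decidable (Spec_get_cnts sushi_go_list out) := by unfold Spec_get_cnts; infer_instance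

-- ===== CLAIM (what is proved, stated in full; the proofs are below) =====
def Claim_equal_get_cnts : Prop := ∀ (sushi_go_list : List Int), Dom_get_cnts sushi_go_list → Spec_get_cnts sushi_go_list (get_cnts sushi_go_list)

-- ===== LEMMAS AND PROOFS =====

-- ===== VERDICT (by name: the statement is the Claim_ definition above) =====
theorem get_cnts_key (xs : List Int) (n w t m d s : Int) :
    xs.foldl
      (fun (acc : Int × Int × Int × Int × Int × Int) card =>
        let (nigiri_cnt, wasabi_cnt, tempura_cnt, maki_cnt, dumpling_cnt, sashimi_cnt) := acc
        if card = 0 then (nigiri_cnt, wasabi_cnt, tempura_cnt + 1, maki_cnt, dumpling_cnt, sashimi_cnt)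
        else if card = 1 then (nigiri_cnt, wasabi_cnt, tempura_cnt, maki_cnt, dumpling_cnt, sashimi_cnt + 1)
        else if card = 2 then (nigiri_cnt, wasabi_cnt, tempura_cnt, maki_cnt, dumpling_cnt + 1, sashimi_cnt)
        else if card = 3 ∨ card = 4 ∨ card = 5 then (nigiri_cnt, wasabi_cnt, tempura_cnt, maki_cnt + (card - 2), dumpling_cnt, sashimi_cnt)
        else if card = 6 ∨ card = 7 ∨ card = 8 then (nigiri_cnt + 1, wasabi_cnt, tempura_cnt, maki_cnt, dumpling_cnt, sashimi_cnt)
        else if card = 9 then (nigiri_cnt, wasabi_cnt + 1, tempura_cnt, maki_cnt, dumpling_cnt, sashimi_cnt)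
        else (nigiri_cnt, wasabi_cnt, tempura_cnt, maki_cnt, dumpling_cnt, sashimi_cnt))
      (n, w, t, m, d, s)
    = (n + (xs.count 6 + xs.count 7 + xs.count 8 : Int),
       w + (xs.count 9 : Int),
       t + (xs.count 0 : Int),
       m + ((xs.count 3 : Int) + 2 * (xs.count 4 : Int) + 3 * (xs.count 5 : Int)),
       d + (xs.count 2 : Int),
       s + (xs.count 1 : Int)) := by
  induction xs generalizing n w t m d s with
  | nil => simp
  | cons x xs ih =>
    simp only [List.foldl_cons]
    by_cases h0 : x = 0
    · subst h0
      simp [ih, Prod.ext_iff]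
      omega
    by_cases h1 : x = 1
    · subst h1
      simp [ih, Prod.ext_iff]
      omega
    by_cases h2 : x = 2
    · subst h2
      simp [ih, Prod.ext_iff]
      omega
    by_cases h3 : x = 3
    · subst h3
      simp [ih, Prod.ext_iff]
      omega
    by_cases h4 : x = 4
    · subst h4
      simp [ih, Prod.ext_iff]
      omega
    by_cases h5 : x = 5
    · subst h5
      simp [ih, Prod.ext_iff]
      omega
    by_cases h6 : x = 6
    · subst h6
      simp [ih, Prod.ext_iff]
      omega
    by_cases h7 : x = 7
    · subst h7
      simp [ih, Prod.ext_iff]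
      omega
    by_cases h8 : x = 8
    · subst h8
      simp [ih, Prod.ext_iff]
      omega
    by_cases h9 : x = 9
    · subst h9
      simp [ih, Prod.ext_iff]
      omega
    simp [ih, h0, h1, h2, h3, h4, h5, h6, h7, h8, h9, Ne.symm h2, Ne.symm h3, Ne.symm h4, Ne.symm h5, Ne.symm h6, Ne.symm h7, Ne.symm h8, Ne.symm h9]

theorem get_cnts_spec : Claim_equal_get_cnts := by
  intro xs _
  unfold Spec_get_cnts get_cnts get_cnts_alt
  simp [get_cnts_key, PySem.List.count_eq]
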